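-- pv_equiv track=rewrite | github.com/cgoodman-eng/niftyTDMS | src/niftytdms/niftytdms.py | TdmsCreateCleanPath
-- ===== SOURCE A (Python) =====
-- def TdmsCreateCleanPath(input_string):
--     valid_chars = set("abcdefghijklmnopqrstuvwxyzABCDEFGHIJKLMNOPQRSTUVWXYZ0123456789")
--     name_start = False
--     result = []
--     prev_char_non_keyable = False
--
--     for char in input_string:
--       if char == '\'':
--         name_start = not name_start
--
--       elif char == '/':
--         if name_start:
--           result.append('_')
--
--         else:
--           result = [''.join(result).strip('-_')]
--           result.append('-')
--           prev_char_non_keyable = True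
--
--       elif char not in valid_chars:
--         if not prev_char_non_keyable:
--           result.append('_')
--           prev_char_non_keyable = True
--
--       else:
--         result.append(char)
--         prev_char_non_keyable = False
--
--     return ''.join(result).strip('-_')
-- ===== SOURCE B (Python) =====
-- def TdmsCreateCleanPath(input_string):
--     valid_chars = set("abcdefghijklmnopqrstuvwxyzABCDEFGHIJKLMNOPQRSTUVWXYZ0123456789")
--     done = ""            # finished part of the path, already fully stripped
--     cur = []             # characters of the segment being built
--     name_start = False
--     prev_char_non_keyable = False
--
--     for char in input_string:
--         if char == '\'':
--             name_start = not name_start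
--         elif char == '/':
--             if name_start:
--                 cur.append('_')
--             else:
--                 seg = ''.join(cur)
--                 if not done:
--                     done = seg.strip('-_')
--                 else:
--                     seg = seg.rstrip('-_')
--                     if seg:
--                         done = done + '-' + seg
--                 cur = []
--                 prev_char_non_keyable = True
--         elif char not in valid_chars:
--             if not prev_char_non_keyable:
--                 cur.append('_')
--                 prev_char_non_keyable = True
--         else:
--             cur.append(char)
--             prev_char_non_keyable = False
--
--     seg = ''.join(cur)
--     if not done:
--         return seg.strip('-_')
--     seg = seg.rstrip('-_')
--     return done + '-' + seg if seg else done
-- ===== Notes on version B (the rewrite author's own statement) =====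
-- stated objective: alternative
-- what changed: A re-joins and strips the entire accumulated result list at every unquoted path separator (quadratic in separator-heavy input); B builds the path incrementally, stripping each completed segment once and appending it to an already-clean prefix in a single pass.
import Mathlib
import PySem

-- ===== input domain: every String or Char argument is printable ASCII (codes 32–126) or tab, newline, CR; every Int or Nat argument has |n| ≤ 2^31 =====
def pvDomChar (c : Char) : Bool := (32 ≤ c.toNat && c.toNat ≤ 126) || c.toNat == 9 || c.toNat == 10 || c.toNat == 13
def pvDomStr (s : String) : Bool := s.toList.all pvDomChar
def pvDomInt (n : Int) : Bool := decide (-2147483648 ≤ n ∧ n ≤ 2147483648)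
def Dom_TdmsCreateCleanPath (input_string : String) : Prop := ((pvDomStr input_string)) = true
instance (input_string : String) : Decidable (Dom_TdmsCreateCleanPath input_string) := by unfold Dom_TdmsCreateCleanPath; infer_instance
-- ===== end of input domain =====

-- B replaces A's re-join-and-strip of the whole accumulator at every unquoted '/' by
-- incremental segment building (each finished segment stripped once); objective: alternative.

-- ===== PORT A =====
def pvValidChars : List Char := "abcdefghijklmnopqrstuvwxyzABCDEFGHIJKLMNOPQRSTUVWXYZ0123456789".toList

-- A's result list of strings is represented by the list of its characters (''.join = concatenation).
def pvA_loop : List Char → Bool → List Char → Bool → List Char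
  | [], _, result, _ => result
  | c :: rest, ns, result, prev =>
    if c == '\'' then pvA_loop rest (!ns) result prev
    else if c == '/' then
      if ns then pvA_loop rest ns (result ++ ['_']) prev
      else pvA_loop rest ns (PySem.Chars.stripChars result "-_".toList ++ ['-']) true
    else if !(pvValidChars.contains c) then
      if !prev then pvA_loop rest ns (result ++ ['_']) true
      else pvA_loop rest ns result prev
    else pvA_loop rest ns (result ++ [c]) false

def TdmsCreateCleanPath (input_string : String) : String :=
  String.ofList (PySem.Chars.stripChars (pvA_loop input_string.toList false [] false) "-_".toList)

-- ===== PORT B =====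
def pvBad (c : Char) : Bool := ("-_".toList).contains c

-- exact port of Python's seg.rstrip('-_')
def pvRstrip (l : List Char) : List Char := (l.reverse.dropWhile pvBad).reverse

-- the slash/finish step of Source B: fold the finished segment into `done`
def pvCombine (done cur : List Char) : List Char :=
  if done = [] then PySem.Chars.stripChars cur "-_".toList
  else
    let seg := pvRstrip cur
    if seg = [] then done else done ++ '-' :: seg

def pvB_loop : List Char → List Char → List Char → Bool → Bool → List Char
  | [], done, cur, _, _ => pvCombine done cur
  | c :: rest, done, cur, ns, prev =>
    if c == '\'' then pvB_loop rest done cur (!ns) prev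
    else if c == '/' then
      if ns then pvB_loop rest done (cur ++ ['_']) ns prev
      else pvB_loop rest (pvCombine done cur) [] ns true
    else if !(pvValidChars.contains c) then
      if !prev then pvB_loop rest done (cur ++ ['_']) ns true
      else pvB_loop rest done cur ns prev
    else pvB_loop rest done (cur ++ [c]) ns false

def TdmsCreateCleanPath_alt (input_string : String) : String :=
  String.ofList (pvB_loop input_string.toList [] [] false false)

-- ===== PRECONDITION & SPEC =====
def Spec_TdmsCreateCleanPath (input_string : String) (out : String) : Prop := out = TdmsCreateCleanPath_alt input_string
instance (input_string : String) (out : String) : Decidable (Spec_TdmsCreateCleanPath input_string out) := by unfold Spec_TdmsCreateCleanPath; infer_instance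

-- ===== CLAIM (what is proved, stated in full; the proofs are below) =====
def Claim_equal_TdmsCreateCleanPath : Prop := ∀ (input_string : String), Dom_TdmsCreateCleanPath input_string → Spec_TdmsCreateCleanPath input_string (TdmsCreateCleanPath input_string)

-- ===== LEMMAS AND PROOFS =====

-- abbreviations used by the proofs
def pvLstr (l : List Char) : List Char := l.dropWhile pvBad
def pvStrip (l : List Char) : List Char := pvRstrip (pvLstr l)

theorem pvStripChars_eq (l : List Char) :
    PySem.Chars.stripChars l "-_".toList = pvStrip l := rfl

-- ends-clean predicates
def pvCleanL (l : List Char) : Prop := l.dropWhile pvBad = l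
def pvCleanR (l : List Char) : Prop := l.reverse.dropWhile pvBad = l.reverse

theorem pvDropWhile_fix_append {p : Char → Bool} {l : List Char} (h : l.dropWhile p = l)
    (hne : l ≠ []) (t : List Char) : (l ++ t).dropWhile p = l ++ t := by
  rw [List.dropWhile_append, h]
  simp [List.isEmpty_iff, hne]

theorem pvDropWhile_idem (p : Char → Bool) (l : List Char) :
    (l.dropWhile p).dropWhile p = l.dropWhile p := by
  induction l with
  | nil => rfl
  | cons c t ih =>
    by_cases h : p c
    · simp [h, ih]
    · simp [h]

theorem pvCleanL_iff (l : List Char) :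
    pvCleanL l ↔ ∀ h, l.head? = some h → pvBad h = false := by
  cases l with
  | nil => simp [pvCleanL]
  | cons c t =>
    simp only [pvCleanL, List.head?_cons, Option.some.injEq]
    constructor
    · intro hfix h hh
      subst hh
      by_contra hb
      simp only [Bool.not_eq_false] at hb
      rw [List.dropWhile_cons_of_pos hb] at hfix
      have hlen := List.length_dropWhile_le pvBad t
      rw [hfix] at hlen
      simp at hlen
    · intro hh
      rw [List.dropWhile_cons_of_neg (by simp [hh c rfl])]

theorem pvRstrip_cleanR (l : List Char) : pvCleanR (pvRstrip l) := by
  unfold pvCleanR pvRstrip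
  rw [List.reverse_reverse]
  exact pvDropWhile_idem _ _

theorem pvRstrip_prefix (l : List Char) : pvRstrip l <+: l := by
  have h := List.dropWhile_suffix (l := l.reverse) (p := pvBad)
  unfold pvRstrip
  conv_rhs => rw [← List.reverse_reverse l]
  rw [List.reverse_prefix]
  exact h

theorem pvRstrip_cleanL {l : List Char} (h : pvCleanL l) : pvCleanL (pvRstrip l) := by
  rcases heq : pvRstrip l with _ | ⟨c, t⟩
  · simp [pvCleanL]
  · obtain ⟨u, hu⟩ := pvRstrip_prefix l
    rw [heq] at hu
    rw [pvCleanL_iff] at h ⊢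
    intro x hx
    simp only [List.head?_cons, Option.some.injEq] at hx
    subst hx
    exact h c (by rw [← hu]; rfl)

theorem pvStrip_cleanL (l : List Char) : pvCleanL (pvStrip l) := by
  exact pvRstrip_cleanL (pvDropWhile_idem pvBad l)
theorem pvStrip_cleanR (l : List Char) : pvCleanR (pvStrip l) := by
  exact pvRstrip_cleanR _

theorem pvRstrip_append_ne {ys : List Char} (h : pvRstrip ys ≠ []) (xs : List Char) :
    pvRstrip (xs ++ ys) = xs ++ pvRstrip ys := by
  have hne : (ys.reverse.dropWhile pvBad).isEmpty = false := by
    cases hd : ys.reverse.dropWhile pvBad with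
    | nil => exact absurd (by simp [pvRstrip, hd]) h
    | cons a t => rfl
  unfold pvRstrip
  rw [List.reverse_append, List.dropWhile_append, hne]
  simp

theorem pvRstrip_append_nil {xs ys : List Char} (h : pvRstrip ys = []) (hc : pvCleanR xs) :
    pvRstrip (xs ++ ys) = xs := by
  have hnil : ys.reverse.dropWhile pvBad = [] := by
    have := congrArg List.reverse h
    simpa [pvRstrip] using this
  unfold pvCleanR at hc
  unfold pvRstrip
  rw [List.reverse_append, List.dropWhile_append, hnil]
  simp [hc]

-- the invariant tying A's accumulator to B's (done, cur) state
def pvInv (result done cur : List Char) : Prop :=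
  (done = [] ∧ (result = cur ∨ result = '-' :: cur)) ∨
  (done ≠ [] ∧ result = done ++ '-' :: cur ∧ pvCleanL done ∧ pvCleanR done)

theorem pvBad_dash : pvBad '-' = true := rfl

theorem pvRstrip_dash_cons_nil {cur : List Char} (h : pvRstrip cur = []) :
    pvRstrip ('-' :: cur) = [] := by
  have hnil : cur.reverse.dropWhile pvBad = [] := by
    have := congrArg List.reverse h
    simpa [pvRstrip] using this
  unfold pvRstrip
  rw [List.reverse_cons, List.dropWhile_append, hnil]
  simp [List.dropWhile_cons_of_pos pvBad_dash]

theorem pvInv_strip {result done cur : List Char} (h : pvInv result done cur) :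
    pvStrip result = pvCombine done cur := by
  rcases h with ⟨hd, hr | hr⟩ | ⟨hd, hr, hcl, hcr⟩
  · subst hd; rw [hr]
    rw [pvCombine, if_pos rfl, pvStripChars_eq]
  · subst hd; rw [hr]
    rw [pvCombine, if_pos rfl, pvStripChars_eq]
    unfold pvStrip pvLstr
    rw [List.dropWhile_cons_of_pos pvBad_dash]
  · rw [hr]
    unfold pvStrip
    have hfix : pvLstr (done ++ '-' :: cur) = done ++ '-' :: cur :=
      pvDropWhile_fix_append hcl hd _
    rw [hfix, pvCombine, if_neg hd]
    by_cases hseg : pvRstrip cur = []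
    · simp only [hseg]
      exact pvRstrip_append_nil (pvRstrip_dash_cons_nil hseg) hcr
    · rw [if_neg hseg]
      have : done ++ '-' :: cur = (done ++ ['-']) ++ cur := by simp
      rw [this, pvRstrip_append_ne hseg]
      simp

theorem pvCombine_clean {result done cur : List Char} (h : pvInv result done cur) :
    pvCleanL (pvCombine done cur) ∧ pvCleanR (pvCombine done cur) := by
  rcases h with ⟨hd, _⟩ | ⟨hd, _, hcl, hcr⟩
  · subst hd
    rw [pvCombine, if_pos rfl, pvStripChars_eq]
    exact ⟨pvStrip_cleanL cur, pvStrip_cleanR cur⟩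
  · rw [pvCombine, if_neg hd]
    by_cases hseg : pvRstrip cur = []
    · simp only [hseg]
      exact ⟨hcl, hcr⟩
    · simp only [if_neg hseg]
      constructor
      · exact pvDropWhile_fix_append hcl hd _
      · unfold pvCleanR
        have hrevne : (pvRstrip cur).reverse ≠ [] := by
          simp [hseg]
        have hfix := pvDropWhile_fix_append (pvRstrip_cleanR cur) hrevne
          ('-' :: done.reverse)
        rw [List.reverse_append, List.reverse_cons, List.append_assoc]
        simpa using hfix

theorem pvInv_append {result done cur : List Char} (h : pvInv result done cur) (c : Char) :
    pvInv (result ++ [c]) done (cur ++ [c]) := by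
  rcases h with ⟨hd, hr | hr⟩ | ⟨hd, hr, hcl, hcr⟩
  · exact Or.inl ⟨hd, Or.inl (by rw [hr])⟩
  · exact Or.inl ⟨hd, Or.inr (by rw [hr]; rfl)⟩
  · exact Or.inr ⟨hd, by rw [hr]; simp, hcl, hcr⟩

theorem pvInv_slash {result done cur : List Char} (h : pvInv result done cur) :
    pvInv (pvStrip result ++ ['-']) (pvCombine done cur) [] := by
  rw [pvInv_strip h]
  by_cases hne : pvCombine done cur = []
  · exact Or.inl ⟨hne, Or.inr (by rw [hne]; rfl)⟩
  · obtain ⟨hcl, hcr⟩ := pvCombine_clean h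
    exact Or.inr ⟨hne, rfl, hcl, hcr⟩

theorem pvLoop_eq (cs : List Char) : ∀ (result done cur : List Char) (ns prev : Bool),
    pvInv result done cur →
    pvStrip (pvA_loop cs ns result prev) = pvB_loop cs done cur ns prev := by
  induction cs with
  | nil => intro result done cur ns prev h; exact pvInv_strip h
  | cons c rest ih =>
    intro result done cur ns prev h
    rw [pvA_loop, pvB_loop]
    rcases eq_or_ne c '\'' with h1 | h1
    · subst h1
      simp only [beq_self_eq_true, if_true]
      exact ih _ _ _ _ _ h
    · simp only [beq_eq_false_iff_ne.mpr h1, Bool.false_eq_true, if_false]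
      rcases eq_or_ne c '/' with h2 | h2
      · subst h2
        simp only [beq_self_eq_true, if_true]
        cases ns with
        | true =>
          simp only [if_true]
          exact ih _ _ _ _ _ (pvInv_append h '_')
        | false =>
          simp only [Bool.false_eq_true, if_false]
          rw [pvStripChars_eq]
          exact ih _ _ _ _ _ (pvInv_slash h)
      · simp only [beq_eq_false_iff_ne.mpr h2, Bool.false_eq_true, if_false]
        by_cases h3 : pvValidChars.contains c
        · simp only [h3, Bool.not_true, Bool.false_eq_true, if_false]
          exact ih _ _ _ _ _ (pvInv_append h c)
        · simp only [Bool.not_eq_true] at h3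
          simp only [h3, Bool.not_false, if_true]
          cases prev with
          | true =>
            simp only [Bool.not_true, Bool.false_eq_true, if_false]
            exact ih _ _ _ _ _ h
          | false =>
            simp only [Bool.not_false, if_true]
            exact ih _ _ _ _ _ (pvInv_append h '_')

-- ===== VERDICT (by name: the statement is the Claim_ definition above) =====
theorem TdmsCreateCleanPath_spec : Claim_equal_TdmsCreateCleanPath := by
  intro s _
  show TdmsCreateCleanPath s = TdmsCreateCleanPath_alt s
  unfold TdmsCreateCleanPath TdmsCreateCleanPath_alt
  rw [pvStripChars_eq]
  congr 1
  exact pvLoop_eq s.toList [] [] [] false false (Or.inl ⟨rfl, Or.inl rfl⟩)
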